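-- pv_equiv track=rewrite | github.com/zijian-optics/SolaireEPDA | src/solaire/exam_compiler/choice_layout.py | _skip_optional_square
-- ===== SOURCE A (Python) =====
-- def _skip_optional_square(s: str, i: int) -> int:
--     """跳过可选 `[ ... ]`（支持嵌套）。"""
--     n = len(s)
--     if i >= n or s[i] != "[":
--         return i
--     depth = 1
--     j = i + 1
--     while j < n and depth:
--         if s[j] == "\\":
--             j += 2 if j + 1 < n else 2
--             continue
--         if s[j] == "[":
--             depth += 1
--         elif s[j] == "]":
--             depth -= 1
--         j += 1
--     return j
-- ===== SOURCE B (Python) =====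
-- def _skip_optional_square(s: str, i: int) -> int:
--     n = len(s)
--     if i >= n or s[i] != "[":
--         return i
--     return _skip_bracket(s, i + 1, n)
--
-- def _skip_bracket(s, j, n):
--     # scan inside one open bracket; recurse per nesting level
--     while j < n:
--         c = s[j]
--         if c == "\\":
--             j += 2
--         elif c == "[":
--             j = _skip_bracket(s, j + 1, n)
--         elif c == "]":
--             return j + 1
--         else:
--             j += 1
--     return j
-- ===== Notes on version B (the rewrite author's own statement) =====
-- stated objective: alternative
-- what changed: Replaces A's explicit integer depth counter over one flat while-loop by a recursive helper that is called once per nested bracket level, carrying no depth variable at all.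
import Mathlib
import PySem

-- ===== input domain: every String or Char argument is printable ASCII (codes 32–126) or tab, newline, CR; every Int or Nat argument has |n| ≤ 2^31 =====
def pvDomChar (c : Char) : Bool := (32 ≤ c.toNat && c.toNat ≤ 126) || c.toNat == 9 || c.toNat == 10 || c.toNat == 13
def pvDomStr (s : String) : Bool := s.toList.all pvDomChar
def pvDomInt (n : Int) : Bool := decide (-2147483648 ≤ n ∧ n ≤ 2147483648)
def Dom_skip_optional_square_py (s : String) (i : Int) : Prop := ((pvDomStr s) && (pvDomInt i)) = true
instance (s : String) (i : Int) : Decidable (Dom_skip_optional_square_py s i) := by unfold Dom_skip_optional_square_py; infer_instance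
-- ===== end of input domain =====

-- B replaces A's integer depth counter by recursion on the nesting structure (one call per open bracket); objective: alternative decomposition, same cost.

-- ===== PORT A =====
-- A's while loop over state (j, depth); `s[j]` is PySem.Str.pyGet? (none = IndexError,
-- unreachable inside Pre_; the port returns j there).
def pvLoopA (s : String) (n : Int) (j : Int) (depth : Int) : Int :=
  if h : j < n ∧ depth ≠ 0 then
    match PySem.Str.pyGet? s j with
    | none => j
    | some c =>
      if c = '\\' then pvLoopA s n (j + 2) depth
      else if c = '[' then pvLoopA s n (j + 1) (depth + 1)
      else if c = ']' then pvLoopA s n (j + 1) (depth - 1)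
      else pvLoopA s n (j + 1) depth
  else j
termination_by (n - j).toNat
decreasing_by all_goals (simp at h ⊢; omega)

def skip_optional_square_py (s : String) (i : Int) : Int :=
  let n : Int := (s.length : Int)
  if i ≥ n then i
  else
    match PySem.Str.pyGet? s i with
    | none => i          -- Python raises IndexError here; outside Pre_
    | some c =>
      if c ≠ '[' then i
      else pvLoopA s n (i + 1) 1

-- ===== PORT B =====
-- B's `_skip_bracket`: the while loop is the tail recursion on j, the per-level call is the
-- nested recursive call; the Nat fuel only makes the nested recursion total in Lean
-- ((n - j).toNat + 1 is always enough, proved below), it is not in Source B.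
def pvSkipBr (s : String) (n : Int) : Nat → Int → Int
  | 0, j => j
  | f + 1, j =>
    if j < n then
      match PySem.Str.pyGet? s j with
      | none => j
      | some c =>
        if c = '\\' then pvSkipBr s n f (j + 2)
        else if c = '[' then pvSkipBr s n f (pvSkipBr s n f (j + 1))
        else if c = ']' then j + 1
        else pvSkipBr s n f (j + 1)
    else j

def skip_optional_square_py_alt (s : String) (i : Int) : Int :=
  let n : Int := (s.length : Int)
  if i ≥ n then i
  else
    match PySem.Str.pyGet? s i with
    | none => i          -- Python raises IndexError here; outside Pre_
    | some c =>
      if c ≠ '[' then i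
      else pvSkipBr s n ((n - (i + 1)).toNat + 1) (i + 1)

-- ===== PRECONDITION & SPEC =====
-- Pre_ excludes exactly the inputs where Python A raises IndexError (i < -len(s)); B raises there too.
def Pre_skip_optional_square_py (s : String) (i : Int) : Prop := -(s.length : Int) ≤ i
instance (s : String) (i : Int) : Decidable (Pre_skip_optional_square_py s i) := by unfold Pre_skip_optional_square_py; infer_instance
def pvWitness_skip_optional_square_py : String × Int := ("[a[b]\\]]x", 0)

def Spec_skip_optional_square_py (s : String) (i : Int) (out : Int) : Prop := out = skip_optional_square_py_alt s i
instance (s : String) (i : Int) (out : Int) : Decidable (Spec_skip_optional_square_py s i out) := by unfold Spec_skip_optional_square_py; infer_instance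

-- ===== CLAIM (what is proved, stated in full; the proofs are below) =====
def Claim_equal_skip_optional_square_py : Prop := ∀ (s : String) (i : Int), Dom_skip_optional_square_py s i → Pre_skip_optional_square_py s i → Spec_skip_optional_square_py s i (skip_optional_square_py s i)

-- ===== LEMMAS AND PROOFS =====

-- the result of B's scanner never moves left
theorem pvSkipBr_ge (s : String) (n : Int) : ∀ (f : Nat) (j : Int), j ≤ pvSkipBr s n f j := by
  intro f
  induction f with
  | zero => intro j; simp [pvSkipBr]
  | succ f ih =>
    intro j
    conv_rhs => unfold pvSkipBr
    by_cases hjn : j < n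
    · rw [if_pos hjn]
      match h : PySem.Str.pyGet? s j with
      | none => simp
      | some c =>
        simp only
        split_ifs with h1 h2 h3
        · have := ih (j + 2); omega
        · have h4 := ih (j + 1)
          have := ih (pvSkipBr s n f (j + 1)); omega
        · omega
        · have := ih (j + 1); omega
    · rw [if_neg hjn]

-- fuel past n - j is irrelevant
theorem pvSkipBr_fuel_succ (s : String) (n : Int) :
    ∀ (f : Nat) (j : Int), n - j ≤ (f : Int) → pvSkipBr s n (f + 1) j = pvSkipBr s n f j := by
  intro f
  induction f with
  | zero =>
    intro j hj
    conv_lhs => unfold pvSkipBr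
    rw [if_neg (by omega)]
    rfl
  | succ f ih =>
    intro j hj
    by_cases hjn : j < n
    · conv_lhs => unfold pvSkipBr
      conv_rhs => unfold pvSkipBr
      rw [if_pos hjn, if_pos hjn]
      match h : PySem.Str.pyGet? s j with
      | none => simp
      | some c =>
        simp only
        split_ifs with h1 h2 h3
        · exact ih (j + 2) (by omega)
        · have hin : pvSkipBr s n (f + 1) (j + 1) = pvSkipBr s n f (j + 1) := ih (j + 1) (by omega)
          rw [hin]
          exact ih (pvSkipBr s n f (j + 1)) (by have := pvSkipBr_ge s n f (j + 1); omega)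
        · rfl
        · exact ih (j + 1) (by omega)
    · conv_lhs => unfold pvSkipBr
      conv_rhs => unfold pvSkipBr
      rw [if_neg hjn, if_neg hjn]

theorem pvSkipBr_fuel_ge (s : String) (n : Int) (f g : Nat) (j : Int)
    (hf : n - j ≤ (f : Int)) (hg : f ≤ g) : pvSkipBr s n g j = pvSkipBr s n f j := by
  induction g with
  | zero =>
    have : f = 0 := by omega
    simp [this]
  | succ g ih =>
    by_cases hfg : f = g + 1
    · simp [hfg]
    · have hle : f ≤ g := by omega
      rw [pvSkipBr_fuel_succ s n g j (by omega)]
      exact ih hle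

-- canonical (fuel-saturated) form of one level of B's scanner
def pvSkipF (s : String) (n : Int) (j : Int) : Int := pvSkipBr s n ((n - j).toNat + 1) j

theorem pvSkipF_eq_fuel (s : String) (n : Int) (f : Nat) (j : Int) (hf : n - j ≤ (f : Int)) :
    pvSkipBr s n f j = pvSkipF s n j := by
  unfold pvSkipF
  by_cases h : f ≤ (n - j).toNat + 1
  · rw [pvSkipBr_fuel_ge s n f ((n - j).toNat + 1) j hf h]
  · rw [pvSkipBr_fuel_ge s n ((n - j).toNat + 1) f j (by omega) (by omega)]

theorem pvSkipF_stop (s : String) (n : Int) (j : Int)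
    (h : ¬ j < n ∨ PySem.Str.pyGet? s j = none) : pvSkipF s n j = j := by
  unfold pvSkipF pvSkipBr
  rcases h with h | h
  · rw [if_neg h]
  · split
    · rw [h]
    · rfl

-- one unfolding of pvSkipF at a live position
theorem pvSkipF_step (s : String) (n : Int) (j : Int) (c : Char) (hjn : j < n)
    (hc : PySem.Str.pyGet? s j = some c) :
    pvSkipF s n j =
      if c = '\\' then pvSkipF s n (j + 2)
      else if c = '[' then pvSkipF s n (pvSkipF s n (j + 1))
      else if c = ']' then j + 1
      else pvSkipF s n (j + 1) := by
  have hpos : ((n - j).toNat : Int) = n - j := by omega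
  conv_lhs => unfold pvSkipF pvSkipBr
  rw [if_pos hjn, hc]
  simp only
  split_ifs with h1 h2 h3
  · exact pvSkipF_eq_fuel s n _ (j + 2) (by omega)
  · rw [pvSkipF_eq_fuel s n _ (j + 1) (by omega)]
    have hge : j + 1 ≤ pvSkipF s n (j + 1) := by
      unfold pvSkipF; exact pvSkipBr_ge s n _ (j + 1)
    exact pvSkipF_eq_fuel s n _ _ (by omega)
  · rfl
  · exact pvSkipF_eq_fuel s n _ (j + 1) (by omega)

theorem pvSkipF_fixed (s : String) (n : Int) (j : Int)
    (h : ¬ j < n ∨ PySem.Str.pyGet? s j = none) (d : Nat) : (pvSkipF s n)^[d] j = j :=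
  Function.iterate_fixed (pvSkipF_stop s n j h) d

-- A's depth-counter loop at depth d is d iterations of B's one-level scanner
theorem pvLoopA_eq_iter (s : String) (n : Int) :
    ∀ (j : Int) (d : Nat), pvLoopA s n j (d : Int) = (pvSkipF s n)^[d] j := by
  intro j
  induction hwf : (n - j).toNat using Nat.strong_induction_on generalizing j with
  | _ m ih =>
    intro d
    match d with
    | 0 => rw [pvLoopA]; simp
    | d + 1 =>
      by_cases hjn : j < n
      · match hc : PySem.Str.pyGet? s j with
        | none =>
          rw [pvLoopA, dif_pos ⟨hjn, by omega⟩, hc, pvSkipF_fixed s n j (Or.inr hc)]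
        | some c =>
          rw [pvLoopA, dif_pos ⟨hjn, by omega⟩, hc]
          simp only
          rw [Function.iterate_succ_apply, pvSkipF_step s n j c hjn hc]
          split_ifs with h1 h2 h3
          · -- backslash: j += 2, depth unchanged
            exact ih (n - (j + 2)).toNat (by omega) (j + 2) rfl (d + 1)
          · -- '[': depth + 1, j + 1
            rw [show ((d + 1 : Nat) : Int) + 1 = ((d + 2 : Nat) : Int) by push_cast; ring,
                ih (n - (j + 1)).toNat (by omega) (j + 1) rfl (d + 2),
                show d + 2 = d + 1 + 1 from rfl, Function.iterate_succ_apply,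
                Function.iterate_succ_apply]
          · -- ']': depth - 1, j + 1
            rw [show ((d + 1 : Nat) : Int) - 1 = ((d : Nat) : Int) by push_cast; ring]
            exact ih (n - (j + 1)).toNat (by omega) (j + 1) rfl d
          · -- ordinary char
            rw [ih (n - (j + 1)).toNat (by omega) (j + 1) rfl (d + 1),
                Function.iterate_succ_apply]
      · rw [pvLoopA, dif_neg (by omega), pvSkipF_fixed s n j (Or.inl hjn)]

-- ===== VERDICT (by name: the statement is the Claim_ definition above) =====
theorem skip_optional_square_py_spec : Claim_equal_skip_optional_square_py := by
  intro s i _ _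
  unfold Spec_skip_optional_square_py skip_optional_square_py skip_optional_square_py_alt
  simp only
  split_ifs with h
  · rfl
  · match hc : PySem.Str.pyGet? s i with
    | none => rfl
    | some c =>
      simp only
      split_ifs with h1
      · rfl
      · have := pvLoopA_eq_iter s (s.length : Int) (i + 1) 1
        simp only [Nat.cast_one, Function.iterate_one] at this
        rw [this]; rfl
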